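-- pv_equiv track=rewrite | github.com/make-it-print/make-it-print.github.io | post-processing-scripts/calibrate-pa.py | modify_accel
-- ===== SOURCE A (Python) =====
-- def is_pa_pattern_start(line:str):
--     return line.startswith("; start pressure advance pattern for layer")
--
-- def is_layer_change(line:str):
--     return line.startswith(";LAYER_CHANGE")
--
-- def modify_accel(content:list):
--     startValue = 5000
--     increment = -1000
--
--     currentValue = startValue
--     idx = 0
--     while idx < len(content):
--         line = content[idx]
--
--         if is_layer_change(line):
--           currentValue = startValue
--
--         if is_pa_pattern_start(line):
--           currentValue += increment
--           accel_to_decel = int(currentValue * 0.5)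
--
--           content.insert(idx + 1, "SET_VELOCITY_LIMIT ACCEL=" + str(currentValue) + " ACCEL_TO_DECEL=" + str(accel_to_decel) + "\n")
--
--         idx += 1
--
--     return content
-- ===== SOURCE B (Python) =====
-- def modify_accel(content: list):
--     # Pass 1: scan the original lines once, tracking the current accel value
--     # and recording every insertion as (original_index, line) without mutating.
--     currentValue = 5000
--     insertions = []
--     for i, line in enumerate(content):
--         if line.startswith(";LAYER_CHANGE"):
--             currentValue = 5000
--         if line.startswith("; start pressure advance pattern for layer"):
--             currentValue -= 1000
--             insertions.append((i, "SET_VELOCITY_LIMIT ACCEL=%d ACCEL_TO_DECEL=%d\n"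
--                                % (currentValue, currentValue // 2)))
--     # Pass 2: apply the insertions back-to-front so earlier indices stay valid.
--     for i, line in reversed(insertions):
--         content.insert(i + 1, line)
--     return content
-- ===== Notes on version B (the rewrite author's own statement) =====
-- stated objective: alternative
-- what changed: A mutates the list it is scanning, re-inspecting each freshly inserted line inside one while loop; B separates the work into a pure detection pass that records (index, line) insertions and a second pass applying them back-to-front via list.insert, preserving the in-place mutation of the argument.
import Mathlib
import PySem

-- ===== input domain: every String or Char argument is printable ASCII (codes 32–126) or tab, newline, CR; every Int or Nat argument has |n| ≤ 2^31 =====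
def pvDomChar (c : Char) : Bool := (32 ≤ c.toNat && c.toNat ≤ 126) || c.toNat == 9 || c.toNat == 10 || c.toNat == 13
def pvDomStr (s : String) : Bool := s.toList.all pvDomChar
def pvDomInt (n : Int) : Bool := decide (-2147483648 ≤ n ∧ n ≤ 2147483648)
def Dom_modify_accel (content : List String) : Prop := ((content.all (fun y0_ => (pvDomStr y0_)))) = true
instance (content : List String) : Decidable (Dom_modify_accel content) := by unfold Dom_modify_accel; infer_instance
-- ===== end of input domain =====

-- B replaces A's scan-while-mutating while loop by a pure detection pass plus a reverse-order
-- insertion pass (objective: alternative decomposition); both mutate the argument list in place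
-- in Python, and the equivalence proved here is about the returned list of lines.

-- ===== PORT A =====
-- is_pa_pattern_start
def pvIsPaStart (line : String) : Bool :=
  PySem.Str.startswith line "; start pressure advance pattern for layer"
-- is_layer_change
def pvIsLayerChange (line : String) : Bool :=
  PySem.Str.startswith line ";LAYER_CHANGE"

-- the inserted line; int(currentValue * 0.5) is exact truncating division here
-- (currentValue is always a multiple of 1000, so the float product is an exact integer)
def pvSetLine (v d : Int) : String :=
  "SET_VELOCITY_LIMIT ACCEL=" ++ PySem.Int.toStr v ++ " ACCEL_TO_DECEL=" ++ PySem.Int.toStr d ++ "\n"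

-- A's while loop; fuel (2*len+1 suffices) only makes the loop total, each step is literal
def modify_accel_loop : Nat → Nat → Int → List String → List String
  | 0, _, _, content => content
  | fuel+1, idx, currentValue, content =>
    match content[idx]? with
    | none => content
    | some line =>
      let currentValue := if pvIsLayerChange line then 5000 else currentValue
      if pvIsPaStart line then
        let currentValue := currentValue + (-1000)
        let accel_to_decel := Int.tdiv currentValue 2   -- int(currentValue * 0.5)
        modify_accel_loop fuel (idx+1) currentValue
          (PySem.List.insert content ((idx : Int) + 1) (pvSetLine currentValue accel_to_decel))
      else
        modify_accel_loop fuel (idx+1) currentValue content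

def modify_accel (content : List String) : List String :=
  modify_accel_loop (2 * content.length + 1) 0 5000 content

-- ===== PORT B =====
-- pass 1 of Source B: enumerate, track currentValue, collect (index, line) insertions
def pvCollect : Nat → Int → List String → List (Nat × String)
  | _, _, [] => []
  | i, cur, line :: rest =>
    let cur := if PySem.Str.startswith line ";LAYER_CHANGE" then 5000 else cur
    if PySem.Str.startswith line "; start pressure advance pattern for layer" then
      (i, pvSetLine (cur - 1000) (PySem.Int.floordiv (cur - 1000) 2)) :: pvCollect (i+1) (cur - 1000) rest
    else
      pvCollect (i+1) cur rest

-- pass 2 of Source B: apply the insertions in reverse order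
def modify_accel_alt (content : List String) : List String :=
  (pvCollect 0 5000 content).reverse.foldl
    (fun c p => PySem.List.insert c ((p.1 : Int) + 1) p.2) content

-- ===== PRECONDITION & SPEC =====
def Spec_modify_accel (content : List String) (out : List String) : Prop := out = modify_accel_alt content
instance (content : List String) (out : List String) : Decidable (Spec_modify_accel content out) := by unfold Spec_modify_accel; infer_instance

-- ===== CLAIM (what is proved, stated in full; the proofs are below) =====
def Claim_equal_modify_accel : Prop := ∀ (content : List String), Dom_modify_accel content → Spec_modify_accel content (modify_accel content)

-- ===== LEMMAS AND PROOFS =====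

-- reference process: what both programs compute on the suffix still to scan
def pvProc : Int → List String → List String
  | _, [] => []
  | cur, line :: rest =>
    let cur := if pvIsLayerChange line then 5000 else cur
    if pvIsPaStart line then
      line :: pvSetLine (cur - 1000) (Int.tdiv (cur - 1000) 2) :: pvProc (cur - 1000) rest
    else
      line :: pvProc cur rest

theorem pvSetLine_head (v d : Int) : (pvSetLine v d).toList.head? = some 'S' := by
  simp [pvSetLine]

theorem pvIsLayerChange_setLine (v d : Int) : pvIsLayerChange (pvSetLine v d) = false := by
  rw [pvIsLayerChange, Bool.eq_false_iff]
  intro h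
  have hp : (";LAYER_CHANGE" : String).toList <+: (pvSetLine v d).toList :=
    (PySem.Chars.startswith_iff _ _).mp (by simpa using h)
  obtain ⟨t, ht⟩ := hp
  have h2 := pvSetLine_head v d
  rw [← ht] at h2
  simp at h2

theorem pvIsPaStart_setLine (v d : Int) : pvIsPaStart (pvSetLine v d) = false := by
  rw [pvIsPaStart, Bool.eq_false_iff]
  intro h
  have hp : ("; start pressure advance pattern for layer" : String).toList <+: (pvSetLine v d).toList :=
    (PySem.Chars.startswith_iff _ _).mp (by simpa using h)
  obtain ⟨t, ht⟩ := hp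
  have h2 := pvSetLine_head v d
  rw [← ht] at h2
  simp at h2

theorem pvTdiv_eq_floordiv {c : Int} (h : (2 : Int) ∣ c) :
    Int.tdiv c 2 = PySem.Int.floordiv c 2 := by
  rw [PySem.Int.floordiv_eq_ediv_of_pos (by norm_num)]
  exact Int.tdiv_eq_ediv_of_dvd h

theorem pvInsert_mid (pre tail : List String) (x : String) :
    PySem.List.insert ((pre ++ tail)) ((pre.length : Int)) x = pre ++ x :: tail := by
  rw [PySem.List.insert_natCast _ _ _ (by simp)]
  rw [List.take_left, List.drop_left]

-- the A loop computes pre ++ pvProc cur rest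
theorem pvLoopA_eq (rest : List String) : ∀ (pre : List String) (cur : Int) (fuel : Nat),
    2 * rest.length ≤ fuel →
    modify_accel_loop fuel pre.length cur (pre ++ rest) = pre ++ pvProc cur rest := by
  induction rest with
  | nil =>
    intro pre cur fuel _
    cases fuel with
    | zero => simp [modify_accel_loop, pvProc]
    | succ f => simp [modify_accel_loop, pvProc]
  | cons line rest ih =>
    intro pre cur fuel hfuel
    obtain ⟨f, rfl⟩ : ∃ f, fuel = f + 1 := ⟨fuel - 1, by simp at hfuel; omega⟩
    have hget : (pre ++ line :: rest)[pre.length]? = some line := by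
      rw [List.getElem?_append_right (le_refl _)]; simp
    rw [modify_accel_loop, hget]
    simp only []
    set cur1 := if pvIsLayerChange line then 5000 else cur with hcur1
    by_cases hpa : pvIsPaStart line = true
    · simp only [hpa, if_pos]
      set L := pvSetLine (cur1 + -1000) (Int.tdiv (cur1 + -1000) 2) with hL
      have hins : PySem.List.insert (pre ++ line :: rest) ((pre.length : Int) + 1) L
          = (pre ++ [line]) ++ L :: rest := by
        have h1 : ((pre.length : Int) + 1) = (((pre ++ [line]).length : Nat) : Int) := by
          simp
        rw [h1, show pre ++ line :: rest = (pre ++ [line]) ++ rest by simp]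
        exact pvInsert_mid (pre ++ [line]) rest L
      rw [hins]
      obtain ⟨g, rfl⟩ : ∃ g, f = g + 1 := ⟨f - 1, by simp at hfuel; omega⟩
      have hget2 : ((pre ++ [line]) ++ L :: rest)[pre.length + 1]? = some L := by
        rw [show pre.length + 1 = (pre ++ [line]).length by simp]
        rw [List.getElem?_append_right (le_refl _)]; simp
      rw [modify_accel_loop, hget2]
      simp only [hL, pvIsLayerChange_setLine, pvIsPaStart_setLine, Bool.false_eq_true,
        if_false]
      rw [show pre.length + 1 + 1 = (pre ++ [line, L]).length by simp,
          show (pre ++ [line]) ++ L :: rest = (pre ++ [line, L]) ++ rest by simp]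
      rw [ih (pre ++ [line, L]) (cur1 + -1000) g (by simp at hfuel ⊢; omega)]
      rw [pvProc]
      simp only [← hcur1, hpa, if_pos]
      simp [hL, sub_eq_add_neg]
    · simp only [hpa]
      simp only [Bool.not_eq_true] at hpa
      rw [show pre.length + 1 = (pre ++ [line]).length by simp,
          show pre ++ line :: rest = (pre ++ [line]) ++ rest by simp]
      rw [ih (pre ++ [line]) cur1 f (by simp at hfuel ⊢; omega)]
      rw [pvProc]
      simp [← hcur1, hpa]

-- the B passes compute pre ++ pvProc cur rest (currentValue stays even, so // 2
-- agrees with A's truncating int(currentValue * 0.5))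
theorem pvB_eq (rest : List String) : ∀ (pre : List String) (cur : Int), (2 : Int) ∣ cur →
    (pvCollect pre.length cur rest).reverse.foldl
      (fun c p => PySem.List.insert c ((p.1 : Int) + 1) p.2) (pre ++ rest)
    = pre ++ pvProc cur rest := by
  induction rest with
  | nil => intro pre cur _; simp [pvCollect, pvProc]
  | cons line rest ih =>
    intro pre cur hdvd
    rw [pvCollect]
    set cur1 := if PySem.Str.startswith line ";LAYER_CHANGE" then 5000 else cur with hcur1
    have hdvd1 : (2 : Int) ∣ cur1 := by
      rw [hcur1]
      split_ifs with h
      · decide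
      · exact hdvd
    have hcurLC : cur1 = if pvIsLayerChange line then 5000 else cur := rfl
    by_cases hpa : PySem.Str.startswith line "; start pressure advance pattern for layer" = true
    · simp only [hpa, if_pos, List.reverse_cons, List.foldl_append, List.foldl_cons,
        List.foldl_nil]
      rw [show pre ++ line :: rest = (pre ++ [line]) ++ rest by simp,
          show pre.length + 1 = (pre ++ [line]).length by simp]
      rw [ih (pre ++ [line]) (cur1 - 1000) (by omega)]
      have h1 : ((pre.length : Int) + 1) = (((pre ++ [line]).length : Nat) : Int) := by
        simp
      rw [h1, pvInsert_mid (pre ++ [line]) (pvProc (cur1 - 1000) rest) _]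
      rw [pvProc]
      simp only [← hcurLC, pvIsPaStart, hpa, if_pos]
      rw [pvTdiv_eq_floordiv (by omega)]
      simp
    · simp only [hpa, Bool.false_eq_true, if_false]
      rw [show pre ++ line :: rest = (pre ++ [line]) ++ rest by simp,
          show pre.length + 1 = (pre ++ [line]).length by simp]
      rw [ih (pre ++ [line]) cur1 hdvd1]
      rw [pvProc]
      simp only [← hcurLC]
      rw [if_neg (show ¬ pvIsPaStart line = true from hpa)]
      simp

-- ===== VERDICT (by name: the statement is the Claim_ definition above) =====
theorem modify_accel_spec : Claim_equal_modify_accel := by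
  intro content _
  unfold Spec_modify_accel modify_accel modify_accel_alt
  have hA := pvLoopA_eq content [] 5000 (2 * content.length + 1) (by omega)
  have hB := pvB_eq content [] 5000 (by decide)
  simp only [List.length_nil, List.nil_append] at hA hB
  rw [hA, hB]
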